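-- pv_equiv track=rewrite | github.com/farhan-navas/conv-transformer | diffuser/preprocessing/label_speakers.py | _cap_consecutive_tokens
-- ===== SOURCE A (Python) =====
-- from typing import List
--
-- def _cap_consecutive_tokens(tokens: List[str], max_repeat: int = 3) -> List[str]:
--     out, prev, cnt = [], None, 0
--     for t in tokens:
--         if t == prev:
--             cnt += 1
--         else:
--             prev, cnt = t, 1
--         if cnt <= max_repeat:
--             out.append(t)
--     return out
-- ===== SOURCE B (Python) =====
-- from itertools import groupby
-- from typing import List
--
-- def _cap_consecutive_tokens(tokens: List[str], max_repeat: int = 3) -> List[str]: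
--     out: List[str] = []
--     for t, grp in groupby(tokens):
--         out.extend([t] * min(len(list(grp)), max_repeat))
--     return out
-- ===== Notes on version B (the rewrite author's own statement) =====
-- stated objective: idiomatic
-- what changed: Replaces the element-wise prev/cnt counter scan with a run-oriented loop over itertools.groupby, emitting min(run_length, max_repeat) copies of each token per maximal run.
import Mathlib
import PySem

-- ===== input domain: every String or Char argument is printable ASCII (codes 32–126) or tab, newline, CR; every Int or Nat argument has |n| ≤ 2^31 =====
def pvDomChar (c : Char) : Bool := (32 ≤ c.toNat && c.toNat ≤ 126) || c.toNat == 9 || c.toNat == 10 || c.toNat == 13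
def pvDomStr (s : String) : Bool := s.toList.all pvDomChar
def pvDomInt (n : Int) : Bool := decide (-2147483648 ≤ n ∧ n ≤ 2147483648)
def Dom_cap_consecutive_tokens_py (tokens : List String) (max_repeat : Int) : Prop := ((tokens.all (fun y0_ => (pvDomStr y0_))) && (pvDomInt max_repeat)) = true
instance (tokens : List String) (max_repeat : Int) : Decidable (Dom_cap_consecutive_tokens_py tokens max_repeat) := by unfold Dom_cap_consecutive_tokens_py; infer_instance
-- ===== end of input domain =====

-- B replaces A's per-element prev/cnt counter scan by a run-oriented loop (itertools.groupby):
-- each maximal run of equal tokens contributes min(run length, max_repeat) copies. Objective: idiomatic.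

-- ===== PORT A =====
-- A's loop: state (out, prev, cnt); prev starts as None (no string equals None).
def capGoA (max_repeat : Int) : List String → List String → Option String → Int → List String
  | [], out, _, _ => out
  | t :: ts, out, prev, cnt =>
    let st := if some t = prev then (prev, cnt + 1) else (some t, (1 : Int))
    capGoA max_repeat ts (if st.2 ≤ max_repeat then out ++ [t] else out) st.1 st.2

def cap_consecutive_tokens_py (tokens : List String) (max_repeat : Int) : List String :=
  capGoA max_repeat tokens [] none 0

-- ===== PORT B =====
-- groupby: peel off the maximal run of the head token, emit min(run length, max_repeat) copies.
def capGoB (max_repeat : Int) : List String → List String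
  | [] => []
  | t :: ts =>
    List.replicate (min ((1 : Int) + (ts.takeWhile (· == t)).length) max_repeat).toNat t
      ++ capGoB max_repeat (ts.dropWhile (· == t))
termination_by l => l.length
decreasing_by
  simpa using Nat.lt_succ_of_le (List.length_dropWhile_le _ _)

def cap_consecutive_tokens_py_alt (tokens : List String) (max_repeat : Int) : List String :=
  capGoB max_repeat tokens

-- ===== PRECONDITION & SPEC =====
def Spec_cap_consecutive_tokens_py (tokens : List String) (max_repeat : Int) (out : List String) : Prop := out = cap_consecutive_tokens_py_alt tokens max_repeat
instance (tokens : List String) (max_repeat : Int) (out : List String) : Decidable (Spec_cap_consecutive_tokens_py tokens max_repeat out) := by unfold Spec_cap_consecutive_tokens_py; infer_instance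

-- ===== CLAIM (what is proved, stated in full; the proofs are below) =====
def Claim_equal_cap_consecutive_tokens_py : Prop := ∀ (tokens : List String) (max_repeat : Int), Dom_cap_consecutive_tokens_py tokens max_repeat → Spec_cap_consecutive_tokens_py tokens max_repeat (cap_consecutive_tokens_py tokens max_repeat)

-- ===== LEMMAS AND PROOFS =====

-- Unfolding j steps of A's loop with prev = some t over j copies of t: the counter goes c → c+j,
-- and a copy of t is appended for each new counter value in (c, c+j] that is ≤ max_repeat.
theorem capGoA_replicate (mr : Int) (t : String) :
    ∀ (j : Nat) (rest out : List String) (c : Int), 0 ≤ c →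
      capGoA mr (List.replicate j t ++ rest) out (some t) c =
        capGoA mr rest (out ++ List.replicate ((min (c + j) mr).toNat - (min c mr).toNat) t) (some t) (c + j) := by
  intro j
  induction j with
  | zero =>
    intro rest out c _
    simp
  | succ n ih =>
    intro rest out c hc
    rw [List.replicate_succ]
    simp only [List.cons_append, capGoA, if_pos]
    rw [ih _ _ _ (by omega)]
    have harr : (if (c + 1 : Int) ≤ mr then out ++ [t] else out)
        ++ List.replicate ((min (c + 1 + n) mr).toNat - (min (c + 1) mr).toNat) t
        = out ++ List.replicate ((min (c + (n + 1 : Nat)) mr).toNat - (min c mr).toNat) t := by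
      by_cases h : (c + 1 : Int) ≤ mr
      · rw [if_pos h]
        rw [List.append_assoc]
        congr 1
        have : [t] ++ List.replicate ((min (c + 1 + n) mr).toNat - (min (c + 1) mr).toNat) t
            = List.replicate (((min (c + 1 + n) mr).toNat - (min (c + 1) mr).toNat) + 1) t := by
          rw [List.replicate_succ]; rfl
        rw [this]
        congr 1
        omega
      · rw [if_neg h]
        congr 2
        omega
    rw [harr]
    congr 1
    push_cast
    ring

theorem takeWhile_eq_replicate (t : String) :
    ∀ (l : List String), l.takeWhile (· == t) = List.replicate (l.takeWhile (· == t)).length t := by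
  intro l
  induction l with
  | nil => simp
  | cons x xs ih =>
    by_cases h : x = t
    · subst h
      rw [List.takeWhile_cons_of_pos (by simp)]
      simp only [List.length_cons, List.replicate_succ]
      exact congrArg _ ih
    · rw [List.takeWhile_cons_of_neg (by simp [h])]
      simp

theorem head_dropWhile_ne (t : String) :
    ∀ (l : List String) (h : String), (l.dropWhile (· == t)).head? = some h → h ≠ t := by
  intro l
  induction l with
  | nil => intro h hh; simp at hh
  | cons x xs ih =>
    intro h hh
    by_cases hx : x = t
    · subst hx
      rw [List.dropWhile_cons_of_pos (by simp)] at hh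
      exact ih h hh
    · rw [List.dropWhile_cons_of_neg (by simp [hx])] at hh
      simp at hh
      subst hh
      exact hx

-- Main loop correspondence: at the start of each maximal run A's state satisfies
-- "prev differs from the head", and then A's output extends by exactly B's run output.
theorem capGoA_eq_capGoB (mr : Int) :
    ∀ (l out : List String) (prev : Option String) (c : Int),
      (∀ h, l.head? = some h → prev ≠ some h) →
      capGoA mr l out prev c = out ++ capGoB mr l := by
  intro l
  induction l using capGoB.induct with
  | case1 => intro out prev c _; simp [capGoA, capGoB]
  | case2 t ts ih =>
    intro out prev c hprev
    have hne : ¬ (some t = prev) := fun h => hprev t rfl h.symm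
    simp only [capGoA, if_neg hne]
    have hdecomp : ts = ts.takeWhile (· == t) ++ ts.dropWhile (· == t) :=
      (List.takeWhile_append_dropWhile).symm
    set k := (ts.takeWhile (· == t)).length with hk
    have hts : ts = List.replicate k t ++ ts.dropWhile (· == t) := by
      conv_lhs => rw [hdecomp]
      rw [← takeWhile_eq_replicate]
    conv_lhs => rw [hts]
    rw [capGoA_replicate _ _ _ _ _ _ (by omega)]
    rw [ih _ _ _ (fun h hh hp => head_dropWhile_ne t ts h hh (Option.some.inj hp).symm)]
    · have hif : (if (1 : Int) ≤ mr then out ++ [t] else out)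
          = out ++ List.replicate (min (1 : Int) mr).toNat t := by
        split_ifs with h
        · rw [show (min (1 : Int) mr).toNat = 1 by omega]
          rfl
        · rw [show (min (1 : Int) mr).toNat = 0 by omega]
          simp
      rw [hif]
      simp only [List.append_assoc]
      congr 1
      conv_rhs => rw [capGoB]
      rw [← List.append_assoc, ← List.replicate_add]
      congr 2
      omega

-- ===== VERDICT (by name: the statement is the Claim_ definition above) =====
theorem cap_consecutive_tokens_py_spec : Claim_equal_cap_consecutive_tokens_py := by
  intro tokens max_repeat _
  unfold Spec_cap_consecutive_tokens_py cap_consecutive_tokens_py cap_consecutive_tokens_py_alt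
  rw [capGoA_eq_capGoB]
  · simp
  · intro h _ hp
    simp at hp
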